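-- pv_equiv track=rewrite | github.com/yskills/aissistant | trainer/lora_service/app/main.py | sanitize_adapter_name
-- ===== SOURCE A (Python) =====
-- def sanitize_adapter_name(value: str) -> str:
--     name = (value or "").strip().lower()
--     cleaned = []
--     for char in name:
--         if char.isalnum() or char in ["-", "_", "."]:
--             cleaned.append(char)
--         else:
--             cleaned.append("-")
--     merged = "".join(cleaned)
--     while "--" in merged:
--         merged = merged.replace("--", "-")
--     merged = merged.strip("-")
--     return merged or "lora-adapter"
-- ===== SOURCE B (Python) =====
-- def sanitize_adapter_name(value: str) -> str:
--     name = (value or "").strip().lower()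
--     out = []
--     prev_dash = False
--     for ch in name:
--         mapped = ch if (ch.isalnum() or ch in ("-", "_", ".")) else "-"
--         if mapped == "-" and prev_dash:
--             continue
--         out.append(mapped)
--         prev_dash = mapped == "-"
--     cleaned = "".join(out).strip("-")
--     return cleaned or "lora-adapter"
-- ===== Notes on version B (the rewrite author's own statement) =====
-- stated objective: alternative
-- what changed: B fuses A's three phases (char-map pass, a 'while "--" in s' repeated-replace loop, strip) into one stateful pass that skips a dash when the previously kept character was a dash.
import Mathlib
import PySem

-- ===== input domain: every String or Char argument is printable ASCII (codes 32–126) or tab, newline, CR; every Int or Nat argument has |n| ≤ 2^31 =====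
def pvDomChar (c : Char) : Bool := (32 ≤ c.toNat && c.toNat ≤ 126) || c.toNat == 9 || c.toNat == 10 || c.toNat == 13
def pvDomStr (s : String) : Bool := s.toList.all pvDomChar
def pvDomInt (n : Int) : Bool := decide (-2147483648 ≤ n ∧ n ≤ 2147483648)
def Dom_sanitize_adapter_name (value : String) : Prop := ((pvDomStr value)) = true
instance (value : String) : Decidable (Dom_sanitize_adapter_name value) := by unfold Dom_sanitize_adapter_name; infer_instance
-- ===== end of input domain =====

-- B collapses dash runs in one stateful pass instead of A's build-then-repeated-replace loop; objective: alternative decomposition.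

-- ===== PORT A =====
-- A-side helpers: `repDD` spells out the recursion of one `s.replace("--", "-")`
-- step; it exists only to prove the termination bound `replace_dd_length_lt`
-- that the port of A's `while "--" in merged` loop cites in `decreasing_by`.
def repDD : List Char → List Char
  | [] => []
  | '-' :: '-' :: t => '-' :: repDD t
  | c :: t => c :: repDD t

theorem go_eq_repDD : ∀ (fuel : Nat) (l acc : List Char), l.length ≤ fuel →
    PySem.Chars.replace.go ['-','-'] ['-'] fuel l acc = acc.reverse ++ repDD l := by
  intro fuel
  induction fuel with
  | zero =>
    intro l acc h
    cases l with
    | nil => simp [PySem.Chars.replace.go, repDD]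
    | cons c t => simp at h
  | succ n ih =>
    intro l acc h
    cases l with
    | nil => simp [PySem.Chars.replace.go, repDD]
    | cons c t =>
      rw [PySem.Chars.replace.go]
      by_cases hc : c = '-' ∧ t.head? = some '-'
      · obtain ⟨rfl, ht⟩ := hc
        cases t with
        | nil => simp at ht
        | cons d t' =>
          simp at ht; subst ht
          have hp : List.isPrefixOf ['-','-'] ('-' :: '-' :: t') = true := by
            simp [List.isPrefixOf]
          simp only [hp, if_pos]
          rw [show List.drop (['-','-'] : List Char).length ('-' :: '-' :: t') = t' from rfl]
          rw [show (['-'] : List Char).reverse ++ acc = '-' :: acc from rfl]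
          rw [ih t' ('-' :: acc) (by simp at h ⊢; omega)]
          simp [repDD]
      · have hp : List.isPrefixOf ['-','-'] (c :: t) = false := by
          cases t with
          | nil => simp [List.isPrefixOf]
          | cons d t' =>
            simp [List.isPrefixOf]
            intro h1 h2
            exact absurd ⟨h1.symm, by simp [h2.symm]⟩ hc
        simp only [hp, Bool.false_eq_true, if_false]
        rw [ih t (c :: acc) (by simp at h ⊢; omega)]
        rw [repDD.eq_3 c t (fun t1 h1 h2 => hc ⟨h1, by simp [h2]⟩)]
        simp

theorem replace_eq_repDD (s : List Char) :
    PySem.Chars.replace s ['-','-'] ['-'] = repDD s := by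
  rw [PySem.Chars.replace]
  simp only [List.isEmpty_cons, Bool.false_eq_true, if_false]
  exact go_eq_repDD s.length s [] (le_refl _)

theorem repDD_length_le (s : List Char) : (repDD s).length ≤ s.length := by
  induction s using repDD.induct with
  | case1 => simp [repDD]
  | case2 t ih => simp [repDD]; omega
  | case3 c t h ih => rw [repDD.eq_3 c t h]; simp; omega

theorem repDD_length_lt (s : List Char) (h : ['-','-'] <:+: s) :
    (repDD s).length < s.length := by
  induction s using repDD.induct with
  | case1 => simp at h
  | case2 t _ =>
    have := repDD_length_le t
    simp [repDD]; omega
  | case3 c t hne ih =>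
    rw [repDD.eq_3 c t hne]
    have ht : ['-','-'] <:+: t := by
      rcases List.infix_cons_iff.mp h with hpre | htl
      · rcases hpre with ⟨r, hr⟩
        cases t with
        | nil => simp at hr
        | cons d t' =>
          simp at hr
          exact absurd (hne t' hr.1.symm (by simp [hr.2.1.symm])) (by simp)
      · exact htl
    have := ih ht
    simp; omega

theorem replace_dd_length_lt (s : List Char)
    (h : PySem.Chars.isIn ['-','-'] s = true) :
    (PySem.Chars.replace s ['-','-'] ['-']).length < s.length := by
  rw [replace_eq_repDD]
  exact repDD_length_lt s ((PySem.Chars.isIn_iff_infix _ _).mp h)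

-- the `while "--" in merged: merged = merged.replace("--", "-")` loop of A
def mergeDashes (s : List Char) : List Char :=
  if h : PySem.Chars.isIn ['-','-'] s = true then
    mergeDashes (PySem.Chars.replace s ['-','-'] ['-'])
  else s
termination_by s.length
decreasing_by exact replace_dd_length_lt s h

def sanitize_adapter_name (value : String) : String :=
  let name := (PySem.Str.lower (PySem.Str.strip value)).toList
  let cleaned := name.foldl
    (fun acc c =>
      if PySem.Chars.isalnum c || c ∈ ['-', '_', '.'] then acc ++ [c] else acc ++ ['-'])
    []
  let merged := mergeDashes cleaned
  let stripped := PySem.Chars.stripChars merged ['-']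
  if stripped = [] then "lora-adapter" else String.mk stripped

-- ===== PORT B =====
def sanitize_adapter_name_alt (value : String) : String :=
  let name := (PySem.Str.lower (PySem.Str.strip value)).toList
  let st := name.foldl
    (fun (s : List Char × Bool) ch =>
      let mapped := if PySem.Chars.isalnum ch || ch ∈ ['-', '_', '.'] then ch else '-'
      if mapped = '-' && s.2 then s
      else (s.1 ++ [mapped], mapped = '-'))
    ([], false)
  let cleaned := PySem.Chars.stripChars st.1 ['-']
  if cleaned = [] then "lora-adapter" else String.mk cleaned

-- ===== PRECONDITION & SPEC =====
def Spec_sanitize_adapter_name (value : String) (out : String) : Prop := out = sanitize_adapter_name_alt value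
instance (value : String) (out : String) : Decidable (Spec_sanitize_adapter_name value out) := by unfold Spec_sanitize_adapter_name; infer_instance

-- ===== CLAIM (what is proved, stated in full; the proofs are below) =====
def Claim_equal_sanitize_adapter_name : Prop := ∀ (value : String), Dom_sanitize_adapter_name value → Spec_sanitize_adapter_name value (sanitize_adapter_name value)

-- ===== LEMMAS AND PROOFS =====

-- the per-character mapping both programs apply
def mapDash (c : Char) : Char :=
  if PySem.Chars.isalnum c || c ∈ ['-', '_', '.'] then c else '-'

-- B's dash-collapse as a recursion (Bool = "last kept char was a dash")
def ddash : Bool → List Char → List Char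
  | _, [] => []
  | b, c :: t => if c = '-' then (if b then ddash true t else '-' :: ddash true t) else c :: ddash false t

-- B's loop body, named
def altStep (s : List Char × Bool) (ch : Char) : List Char × Bool :=
  if mapDash ch = '-' && s.2 then s
  else (s.1 ++ [mapDash ch], mapDash ch = '-')

theorem ddash_repDD (s : List Char) : ∀ b, ddash b (repDD s) = ddash b s := by
  induction s using repDD.induct with
  | case1 => simp [repDD]
  | case2 t ih =>
    intro b
    cases b <;> simp [repDD, ddash, ih]
  | case3 c t hne ih =>
    intro b
    rw [repDD.eq_3 c t hne]
    by_cases hc : c = '-'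
    · subst hc
      have ht : t.head? ≠ some '-' := by
        intro hh
        cases t with
        | nil => simp at hh
        | cons d t' => simp at hh; exact hne t' rfl (by rw [hh])
      cases b <;> simp [ddash, ih]
    · simp [ddash, hc, ih]

theorem ddash_self (s : List Char) : ∀ b, ¬ ['-','-'] <:+: s →
    (b = true → s.head? ≠ some '-') → ddash b s = s := by
  induction s with
  | nil => intro b _ _; simp [ddash]
  | cons c t ih =>
    intro b hinf hb
    have htinf : ¬ ['-','-'] <:+: t := fun h => hinf (List.infix_cons_iff.mpr (Or.inr h))
    by_cases hc : c = '-'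
    · subst hc
      have hbf : b = false := by
        cases b with
        | false => rfl
        | true => have := hb rfl; simp at this
      subst hbf
      have hth : t.head? ≠ some '-' := by
        intro hh
        cases t with
        | nil => simp at hh
        | cons d t' =>
          simp at hh; subst hh
          exact hinf (List.infix_cons_iff.mpr (Or.inl (by simp)))
      simp [ddash, ih true htinf (fun _ => hth)]
    · simp [ddash, hc, ih false htinf (by simp)]

theorem mergeDashes_eq_ddash (s : List Char) : mergeDashes s = ddash false s := by
  induction s using mergeDashes.induct with
  | case1 s h ih =>
    rw [mergeDashes, dif_pos h, ih, replace_eq_repDD, ddash_repDD]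
  | case2 s h =>
    rw [mergeDashes, dif_neg h]
    have hni : ¬ ['-','-'] <:+: s := fun hi => h ((PySem.Chars.isIn_iff_infix _ _).mpr hi)
    exact (ddash_self s false hni (by simp)).symm

theorem foldl_cleaned (l : List Char) (acc : List Char) :
    l.foldl (fun acc c =>
      if PySem.Chars.isalnum c || c ∈ ['-', '_', '.'] then acc ++ [c] else acc ++ ['-']) acc
      = acc ++ l.map mapDash := by
  have hstep : (fun (acc : List Char) c =>
      if PySem.Chars.isalnum c || c ∈ ['-', '_', '.'] then acc ++ [c] else acc ++ ['-'])
      = fun acc c => acc ++ [mapDash c] := by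
    funext a c
    unfold mapDash
    split <;> rfl
  rw [hstep]
  exact PySem.List.foldl_append_singleton_eq_map mapDash l acc

theorem foldl_altStep (l : List Char) : ∀ (out : List Char) (prev : Bool),
    (l.foldl altStep (out, prev)).1 = out ++ ddash prev (l.map mapDash) := by
  induction l with
  | nil => intro out prev; simp [ddash]
  | cons c t ih =>
    intro out prev
    simp only [List.foldl_cons, List.map_cons]
    by_cases hd : mapDash c = '-'
    · cases prev with
      | true =>
        rw [show altStep (out, true) c = (out, true) by simp [altStep, hd]]
        rw [ih out true]
        simp [ddash, hd]
      | false =>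
        rw [show altStep (out, false) c = (out ++ ['-'], true) by simp [altStep, hd]]
        rw [ih (out ++ ['-']) true]
        simp [ddash, hd]
    · rw [show altStep (out, prev) c = (out ++ [mapDash c], false) by simp [altStep, hd]]
      rw [ih (out ++ [mapDash c]) false]
      simp [ddash, hd]

theorem foldl_alt (l : List Char) (out : List Char) (prev : Bool) :
    (l.foldl (fun (s : List Char × Bool) ch =>
      let mapped := if PySem.Chars.isalnum ch || ch ∈ ['-', '_', '.'] then ch else '-'
      if mapped = '-' && s.2 then s
      else (s.1 ++ [mapped], mapped = '-')) (out, prev)).1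
      = out ++ ddash prev (l.map mapDash) := by
  have hstep : (fun (s : List Char × Bool) ch =>
      let mapped := if PySem.Chars.isalnum ch || ch ∈ ['-', '_', '.'] then ch else '-'
      if mapped = '-' && s.2 then s
      else (s.1 ++ [mapped], mapped = '-')) = altStep := by
    funext s ch
    rfl
  rw [hstep]
  exact foldl_altStep l out prev

-- ===== VERDICT (by name: the statement is the Claim_ definition above) =====
theorem sanitize_adapter_name_spec : Claim_equal_sanitize_adapter_name := by
  intro value _
  unfold Spec_sanitize_adapter_name sanitize_adapter_name sanitize_adapter_name_alt
  simp only [foldl_cleaned, foldl_alt, List.nil_append, mergeDashes_eq_ddash]
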